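-- pv_equiv track=rewrite | github.com/shaikush6/underground_stories | core/packages/timeless_retold/timeless_processor.py | _extract_book_info
-- ===== SOURCE A (Python) =====
-- from typing import List, Dict, Optional, Tuple
--
-- def _extract_book_info(content: str) -> Dict[str, str]:
--     """Extract book title and author from content"""
--     lines = content.split('\n')
--
--     # Look for title in first few lines
--     title = "Unknown Classic"
--     author = "Classic Author"
--
--     for i, line in enumerate(lines[:20]):
--         line = line.strip()
--         if line and not line.startswith('CHAPTER') and len(line) > 3:
--             # First substantial line is likely the title
--             if title == "Unknown Classic":
--                 title = line
--                 continue
--             # Look for "by [Author]" pattern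
--             if line.lower().startswith('by '):
--                 author = line[3:].strip()
--                 break
--
--     # For The Lost World specifically
--     if "lost world" in content.lower()[:1000]:
--         title = "The Lost World"
--         author = "Sir Arthur Conan Doyle"
--
--     return {
--         "title": title,
--         "author": author
--     }
-- ===== SOURCE B (Python) =====
-- from typing import List, Dict, Optional, Tuple
--
-- def _seek_author(lines):
--     """Recursive phase 2: first substantial line starting with 'by ' gives the author."""
--     if not lines:
--         return "Classic Author"
--     s = lines[0].strip()
--     if s and not s.startswith('CHAPTER') and len(s) > 3 and s.lower().startswith('by '):
--         return s[3:].strip()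
--     return _seek_author(lines[1:])
--
-- def _seek_title(lines):
--     """Recursive phase 1: first substantial line is the title, author sought in the rest."""
--     if not lines:
--         return "Unknown Classic", "Classic Author"
--     s = lines[0].strip()
--     if s and not s.startswith('CHAPTER') and len(s) > 3:
--         return s, _seek_author(lines[1:])
--     return _seek_title(lines[1:])
--
-- def _extract_book_info(content: str) -> Dict[str, str]:
--     """Extract book title and author from content (recursive two-phase descent)"""
--     if "lost world" in content.lower()[:1000]:
--         return {"title": "The Lost World", "author": "Sir Arthur Conan Doyle"}
--     title, author = _seek_title(content.split('\n')[:20])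
--     return {"title": title, "author": author}
-- ===== Notes on version B (the rewrite author's own statement) =====
-- stated objective: alternative
-- what changed: Replaces A's single stateful loop (sentinel title check, continue/break) with a recursive two-phase descent: _seek_title recurses down the line list until the first substantial line (the title) and hands the remaining lines to _seek_author, which recurses until a 'by '-prefixed substantial line; no mutable state or sentinel comparison remains.
-- intended difference: On inputs whose first substantial line is literally 'Unknown Classic' while another substantial line follows (and the lost-world override does not fire), A mistakes that line for its unset-title sentinel and titles the book by the next substantial line, whereas B returns the first substantial line itself as the title, which is the intended value: a real opening line colliding with the sentinel should not be skipped. — e.g. on _extract_book_info("Unknown Classic\nA Real Title\nby Bob Smith"): A returns [("title", "A Real Title"), ("author", "Bob Smith")], B returns [("title", "Unknown Classic"), ("author", "Bob Smith")]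
import Mathlib
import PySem

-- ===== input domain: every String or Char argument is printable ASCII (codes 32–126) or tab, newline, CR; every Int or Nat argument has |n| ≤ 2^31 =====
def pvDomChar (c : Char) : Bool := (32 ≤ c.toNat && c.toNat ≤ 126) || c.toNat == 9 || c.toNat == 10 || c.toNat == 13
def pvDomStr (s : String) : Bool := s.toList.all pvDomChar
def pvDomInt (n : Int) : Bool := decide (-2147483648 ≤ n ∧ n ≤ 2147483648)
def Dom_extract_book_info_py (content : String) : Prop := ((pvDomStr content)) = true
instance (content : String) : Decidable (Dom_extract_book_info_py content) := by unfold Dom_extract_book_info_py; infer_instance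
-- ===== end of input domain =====

-- B replaces A's stateful sentinel loop by a recursive two-phase descent (alternative decomposition);
-- it intentionally keeps a first substantial line equal to "Unknown Classic" as the title (see D_).


-- "substantial line" test both Pythons share textually: stripped line nonempty, no 'CHAPTER' prefix, length > 3
def pvSubst (s : String) : Bool :=
  (s != "") && (!PySem.Str.startswith s "CHAPTER") && decide (3 < PySem.Str.len s)

-- 'line.lower().startswith("by ")'
def pvByP (s : String) : Bool := PySem.Str.startswith (PySem.Str.lower s) "by "

-- '"lost world" in content.lower()[:1000]'
def pvLostWorld (content : String) : Bool :=
  PySem.Str.isIn "lost world" (PySem.Str.slice (PySem.Str.lower content) none (some 1000))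

-- 'content.split("\n")' — split? is some for every non-empty separator, so getD is exact
def pvSplitLines (content : String) : List String :=
  (PySem.Str.split? content "\n").getD []

-- ===== PORT A =====
-- A's for-loop: state (title, author); 'continue' = tail call, 'break' = return
def pvLoopA : List String → String → String → String × String
  | [], title, author => (title, author)
  | line :: rest, title, author =>
    let l := PySem.Str.strip line
    if pvSubst l then
      if title == "Unknown Classic" then pvLoopA rest l author
      else if pvByP l then (title, PySem.Str.strip (PySem.Str.slice l (some 3) none))
      else pvLoopA rest title author
    else pvLoopA rest title author

def extract_book_info_py (content : String) : List (String × String) :=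
  let lines := pvSplitLines content
  let p := pvLoopA (PySem.List.slice lines none (some 20)) "Unknown Classic" "Classic Author"
  let q := if pvLostWorld content then ("The Lost World", "Sir Arthur Conan Doyle") else p
  [("title", q.1), ("author", q.2)]

-- ===== PORT B =====
-- B's '_seek_author': recurse until a substantial line starting with 'by '
def pvSeekAuthor : List String → String
  | [] => "Classic Author"
  | line :: rest =>
    let s := PySem.Str.strip line
    if pvSubst s && pvByP s then PySem.Str.strip (PySem.Str.slice s (some 3) none)
    else pvSeekAuthor rest

-- B's '_seek_title': recurse until the first substantial line, then seek the author in the rest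
def pvSeekTitle : List String → String × String
  | [] => ("Unknown Classic", "Classic Author")
  | line :: rest =>
    let s := PySem.Str.strip line
    if pvSubst s then (s, pvSeekAuthor rest)
    else pvSeekTitle rest

def extract_book_info_py_alt (content : String) : List (String × String) :=
  if pvLostWorld content then [("title", "The Lost World"), ("author", "Sir Arthur Conan Doyle")]
  else
    let ta := pvSeekTitle ((pvSplitLines content).take 20)
    [("title", ta.1), ("author", ta.2)]

-- ===== PRECONDITION & SPEC =====
-- A uses "Unknown Classic" as a sentinel: if the first substantial line is literally "Unknown Classic"
-- and another substantial line follows (and no lost-world override), A discards it and titles the book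
-- by the next substantial line; B returns "Unknown Classic" itself as the title, the intended value.
-- input-shape tests for D_: does the first substantial line equal the sentinel,
-- and is there any substantial line different from it?
def pvFirstSubstIsUC : List String → Bool
  | [] => false
  | l :: rest =>
    if pvSubst (PySem.Str.strip l) then PySem.Str.strip l == "Unknown Classic"
    else pvFirstSubstIsUC rest

def pvHasOtherSubst : List String → Bool
  | [] => false
  | l :: rest =>
    (pvSubst (PySem.Str.strip l) && (PySem.Str.strip l != "Unknown Classic")) ||
      pvHasOtherSubst rest

def D_extract_book_info_py (content : String) : Prop :=
  pvFirstSubstIsUC ((pvSplitLines content).take 20) = true ∧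
  pvHasOtherSubst ((pvSplitLines content).take 20) = true ∧
  pvLostWorld content = false
instance (content : String) : Decidable (D_extract_book_info_py content) := by
  unfold D_extract_book_info_py; infer_instance

def Spec_extract_book_info_py (content : String) (out : List (String × String)) : Prop :=
  ¬ D_extract_book_info_py content → out = extract_book_info_py_alt content
instance (content : String) (out : List (String × String)) : Decidable (Spec_extract_book_info_py content out) := by
  unfold Spec_extract_book_info_py; infer_instance

def pvDiffWitness_extract_book_info_py : String := "Unknown Classic\nA Real Title\nby Bob Smith"
def pvDiffWitnessOut_extract_book_info_py : (List (String × String)) × (List (String × String)) :=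
  ([("title", "A Real Title"), ("author", "Bob Smith")],
   [("title", "Unknown Classic"), ("author", "Bob Smith")])

-- ===== CLAIM (what is proved, stated in full; the proofs are below) =====
def Claim_unchanged_extract_book_info_py : Prop := ∀ (content : String), Dom_extract_book_info_py content → Spec_extract_book_info_py content (extract_book_info_py content)
def Claim_changed_extract_book_info_py : Prop := Dom_extract_book_info_py (pvDiffWitness_extract_book_info_py) ∧ D_extract_book_info_py (pvDiffWitness_extract_book_info_py) ∧ extract_book_info_py (pvDiffWitness_extract_book_info_py) = pvDiffWitnessOut_extract_book_info_py.1 ∧ extract_book_info_py_alt (pvDiffWitness_extract_book_info_py) = pvDiffWitnessOut_extract_book_info_py.2 ∧ pvDiffWitnessOut_extract_book_info_py.1 ≠ pvDiffWitnessOut_extract_book_info_py.2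
def Claim_exact_extract_book_info_py : Prop := ∀ (content : String), Dom_extract_book_info_py content → D_extract_book_info_py content → extract_book_info_py content ≠ extract_book_info_py_alt content

-- ===== LEMMAS AND PROOFS =====

-- the substantial stripped lines of a raw line list (proof-only view)
def pvSub (ls : List String) : List String :=
  ls.filterMap (fun line => let s := PySem.Str.strip line; if pvSubst s then some s else none)

theorem pvSub_cons_pos (line : String) (rest : List String)
    (h : pvSubst (PySem.Str.strip line) = true) :
    pvSub (line :: rest) = PySem.Str.strip line :: pvSub rest := by
  simp [pvSub, h]

theorem pvSub_cons_neg (line : String) (rest : List String)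
    (h : pvSubst (PySem.Str.strip line) = false) :
    pvSub (line :: rest) = pvSub rest := by
  simp [pvSub, h]

theorem pvSlice20 (xs : List String) : PySem.List.slice xs none (some 20) = xs.take 20 := by
  exact_mod_cast PySem.List.slice_to_natCast (xs := xs) (b := 20)

theorem pvHasOtherSubst_iff (ls : List String) :
    pvHasOtherSubst ls = true ↔ ∃ s ∈ pvSub ls, s ≠ "Unknown Classic" := by
  induction ls with
  | nil => simp [pvHasOtherSubst, pvSub]
  | cons l rest ih =>
    cases h : pvSubst (PySem.Str.strip l) with
    | true => rw [pvSub_cons_pos _ _ h]; simp [pvHasOtherSubst, h, ih]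
    | false => rw [pvSub_cons_neg _ _ h]; simpa [pvHasOtherSubst, h] using ih

-- pvByP is false on the sentinel string
theorem pvByP_uc : pvByP "Unknown Classic" = false := by decide

-- once A's title is set (≠ sentinel), its remaining loop computes exactly B's author search
theorem pvLoopA_phase2 (ls : List String) (t : String) (ht : (t == "Unknown Classic") = false) :
    pvLoopA ls t "Classic Author" = (t, pvSeekAuthor ls) := by
  induction ls with
  | nil => simp [pvLoopA, pvSeekAuthor]
  | cons line rest ih =>
    cases h : pvSubst (PySem.Str.strip line) with
    | false => simpa [pvLoopA, pvSeekAuthor, h] using ih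
    | true =>
      cases hb : pvByP (PySem.Str.strip line) with
      | true => simp [pvLoopA, pvSeekAuthor, h, ht, hb]
      | false => simpa [pvLoopA, pvSeekAuthor, h, ht, hb] using ih

theorem pvLoopA_all_uc (ls : List String)
    (h : ∀ s ∈ pvSub ls, s = "Unknown Classic") :
    pvLoopA ls "Unknown Classic" "Classic Author" = ("Unknown Classic", "Classic Author") := by
  induction ls with
  | nil => simp [pvLoopA]
  | cons line rest ih =>
    cases hc : pvSubst (PySem.Str.strip line) with
    | false =>
      rw [pvSub_cons_neg _ _ hc] at h
      simpa [pvLoopA, hc] using ih h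
    | true =>
      rw [pvSub_cons_pos _ _ hc] at h
      have hl : PySem.Str.strip line = "Unknown Classic" := h _ (List.mem_cons_self ..)
      have := ih (fun s hs => h s (List.mem_cons_of_mem _ hs))
      simp [pvLoopA, hl, this]

theorem pvSeekAuthor_all_uc (ls : List String)
    (h : ∀ s ∈ pvSub ls, s = "Unknown Classic") :
    pvSeekAuthor ls = "Classic Author" := by
  induction ls with
  | nil => simp [pvSeekAuthor]
  | cons line rest ih =>
    cases hc : pvSubst (PySem.Str.strip line) with
    | false =>
      rw [pvSub_cons_neg _ _ hc] at h
      simpa [pvSeekAuthor, hc] using ih h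
    | true =>
      rw [pvSub_cons_pos _ _ hc] at h
      have hl : PySem.Str.strip line = "Unknown Classic" := h _ (List.mem_cons_self ..)
      have := ih (fun s hs => h s (List.mem_cons_of_mem _ hs))
      simp [pvSeekAuthor, hc, hl, pvByP_uc, this]

theorem pvLoopA_ne_uc (ls : List String)
    (h : ∃ s ∈ pvSub ls, s ≠ "Unknown Classic") :
    (pvLoopA ls "Unknown Classic" "Classic Author").1 ≠ "Unknown Classic" := by
  induction ls with
  | nil => simp [pvSub] at h
  | cons line tl ih =>
    cases hc : pvSubst (PySem.Str.strip line) with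
    | false =>
      rw [pvSub_cons_neg _ _ hc] at h
      simpa [pvLoopA, hc] using ih h
    | true =>
      rw [pvSub_cons_pos _ _ hc] at h
      cases hl : (PySem.Str.strip line == "Unknown Classic") with
      | false =>
        simp only [pvLoopA, hc, beq_self_eq_true, if_true]
        rw [pvLoopA_phase2 tl _ hl]
        simpa using hl
      | true =>
        have hl' : PySem.Str.strip line = "Unknown Classic" := eq_of_beq hl
        have hrest : ∃ s ∈ pvSub tl, s ≠ "Unknown Classic" := by
          obtain ⟨w, hw, hwne⟩ := h
          rcases List.mem_cons.mp hw with hw | hw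
          · exact absurd (hw.trans hl') hwne
          · exact ⟨w, hw, hwne⟩
        simpa [pvLoopA, hc, hl'] using ih hrest

-- B's title is the sentinel whenever the first substantial line is the sentinel
theorem pvSeekTitle_first_uc (ls : List String) (h : pvFirstSubstIsUC ls = true) :
    (pvSeekTitle ls).1 = "Unknown Classic" := by
  induction ls with
  | nil => simp [pvFirstSubstIsUC] at h
  | cons line rest ih =>
    cases hc : pvSubst (PySem.Str.strip line) with
    | false =>
      simp only [pvFirstSubstIsUC, hc, if_false] at h
      simpa [pvSeekTitle, hc] using ih h
    | true =>
      simp only [pvFirstSubstIsUC, hc, if_true] at h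
      have hcU : pvSubst "Unknown Classic" = true := (eq_of_beq h) ▸ hc
      simp [pvSeekTitle, hcU, eq_of_beq h]

-- the core agreement: outside D_'s shape, A's loop equals B's recursive descent
theorem pvLoopA_eq_seekTitle (ls : List String)
    (hND : ¬ (pvFirstSubstIsUC ls = true ∧ pvHasOtherSubst ls = true)) :
    pvLoopA ls "Unknown Classic" "Classic Author" = pvSeekTitle ls := by
  induction ls with
  | nil => simp [pvLoopA, pvSeekTitle]
  | cons line rest ih =>
    cases hc : pvSubst (PySem.Str.strip line) with
    | false =>
      have : ¬ (pvFirstSubstIsUC rest = true ∧ pvHasOtherSubst rest = true) := by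
        intro ⟨h1, h2⟩
        exact hND ⟨by simpa [pvFirstSubstIsUC, hc] using h1,
                   by simp [pvHasOtherSubst, hc, h2]⟩
      simpa [pvLoopA, pvSeekTitle, hc] using ih this
    | true =>
      cases hl : (PySem.Str.strip line == "Unknown Classic") with
      | false =>
        simp only [pvLoopA, pvSeekTitle, hc, if_true, beq_self_eq_true]
        exact pvLoopA_phase2 rest _ hl
      | true =>
        have hl' : PySem.Str.strip line = "Unknown Classic" := eq_of_beq hl
        have hfirst : pvFirstSubstIsUC (line :: rest) = true := by
          simp [pvFirstSubstIsUC, hc, hl]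
        have hno : pvHasOtherSubst (line :: rest) = false := by
          cases hh : pvHasOtherSubst (line :: rest) with
          | false => rfl
          | true => exact absurd ⟨hfirst, hh⟩ hND
        have hall : ∀ s ∈ pvSub (line :: rest), s = "Unknown Classic" := by
          intro s hs
          by_contra hne
          have := (pvHasOtherSubst_iff (line :: rest)).mpr ⟨s, hs, hne⟩
          simp [this] at hno
        have hallrest : ∀ s ∈ pvSub rest, s = "Unknown Classic" := by
          intro s hs
          exact hall s (by rw [pvSub_cons_pos _ _ hc]; exact List.mem_cons_of_mem _ hs)
        rw [pvLoopA_all_uc _ hall]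
        have hcU : pvSubst "Unknown Classic" = true := hl' ▸ hc
        simp [pvSeekTitle, hcU, hl', pvSeekAuthor_all_uc _ hallrest]

-- ===== VERDICT (by name: the statement is the Claim_ definition above) =====
theorem extract_book_info_py_spec : Claim_unchanged_extract_book_info_py := by
  intro content _ hND
  by_cases hlw : pvLostWorld content = true
  · simp [extract_book_info_py, extract_book_info_py_alt, hlw]
  · have hlw' : pvLostWorld content = false := by simpa using hlw
    have hND' : ¬ (pvFirstSubstIsUC ((pvSplitLines content).take 20) = true ∧
        pvHasOtherSubst ((pvSplitLines content).take 20) = true) := by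
      intro ⟨h1, h2⟩; exact hND ⟨h1, h2, hlw'⟩
    simp only [extract_book_info_py, extract_book_info_py_alt, hlw', Bool.false_eq_true,
      if_false, pvSlice20]
    rw [pvLoopA_eq_seekTitle _ hND']

theorem extract_book_info_py_changed : Claim_changed_extract_book_info_py := by
  unfold Claim_changed_extract_book_info_py; decide

theorem extract_book_info_py_tight : Claim_exact_extract_book_info_py := by
  intro content _ hD
  obtain ⟨hhead, hex, hlw⟩ := hD
  have hne := pvLoopA_ne_uc ((pvSplitLines content).take 20) ((pvHasOtherSubst_iff _).mp hex)
  have hb := pvSeekTitle_first_uc ((pvSplitLines content).take 20) hhead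
  intro heq
  simp only [extract_book_info_py, extract_book_info_py_alt, hlw, Bool.false_eq_true,
    if_false, pvSlice20, List.cons.injEq, Prod.mk.injEq] at heq
  exact hne (heq.1.2.trans hb)
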